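-- pv_equiv track=rewrite | github.com/jay-thakur/geeksforgeeks_py | practice/Basic/maxi_num_of_partitions.py | maxi_no_of_partitions
-- ===== SOURCE A (Python) =====
-- def maxi_no_of_partitions(arr):
--     count = 0
--     max_element = 0
--     for i, e in enumerate(arr):
--         max_element = max(max_element, e)
--         if i == max_element:
--             count += 1
--     return count
-- ===== SOURCE B (Python) =====
-- def maxi_no_of_partitions(arr):
--     # stateless brute force: for each index, recompute the clamped prefix
--     # maximum from scratch and compare it with the index (no running state)
--     return sum(1 for i in range(len(arr)) if max([0] + arr[:i+1]) == i)
-- ===== Notes on version B (the rewrite author's own statement) =====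
-- stated objective: alternative
-- what changed: B drops A's running-maximum state entirely: for every index it recomputes the clamped prefix maximum from scratch over a fresh slice and counts matches, a stateless O(n^2) nested scan instead of A's single accumulator pass.
import Mathlib
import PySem

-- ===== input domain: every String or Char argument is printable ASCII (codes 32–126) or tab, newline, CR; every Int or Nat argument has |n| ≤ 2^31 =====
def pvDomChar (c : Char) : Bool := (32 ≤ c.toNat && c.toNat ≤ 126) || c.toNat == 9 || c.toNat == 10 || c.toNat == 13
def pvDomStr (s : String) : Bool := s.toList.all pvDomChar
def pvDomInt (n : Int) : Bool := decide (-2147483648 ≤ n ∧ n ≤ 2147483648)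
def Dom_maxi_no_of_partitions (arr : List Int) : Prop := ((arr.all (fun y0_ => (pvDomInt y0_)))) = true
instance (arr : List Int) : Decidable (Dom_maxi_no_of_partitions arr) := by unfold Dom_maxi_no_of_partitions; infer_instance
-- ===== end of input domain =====

-- B replaces A's fused running-maximum loop by a stateless nested scan: for each index it
-- recomputes the clamped prefix maximum over a fresh slice and counts matches (alternative; O(n^2)).


-- ===== PORT A =====
def maxi_no_of_partitions (arr : List Int) : Int :=
  ((PySem.List.enumerate arr 0).foldl
    (fun (st : Int × Int) (p : Int × Int) =>
      let me := max st.2 p.2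
      (if p.1 == me then st.1 + 1 else st.1, me))
    (0, 0)).1

-- ===== PORT B =====
-- max([0] + arr[:i+1]) is ported as a left fold of max with initial 0 over the slice,
-- which is exactly Python's max over the 0-fronted list.
def maxi_no_of_partitions_alt (arr : List Int) : Int :=
  (PySem.List.pyRange 0 (arr.length : Int) 1).foldl
    (fun (c : Int) (i : Int) =>
      if (PySem.List.slice arr none (some (i + 1))).foldl max 0 == i then c + 1 else c)
    0

-- ===== PRECONDITION & SPEC =====
def Spec_maxi_no_of_partitions (arr : List Int) (out : Int) : Prop := out = maxi_no_of_partitions_alt arr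
instance (arr : List Int) (out : Int) : Decidable (Spec_maxi_no_of_partitions arr out) := by unfold Spec_maxi_no_of_partitions; infer_instance

-- ===== CLAIM (what is proved, stated in full; the proofs are below) =====
def Claim_equal_maxi_no_of_partitions : Prop := ∀ (arr : List Int), Dom_maxi_no_of_partitions arr → Spec_maxi_no_of_partitions arr (maxi_no_of_partitions arr)

-- ===== LEMMAS AND PROOFS =====

/-- reference count: indices from `s`, running max `m` (proof-only helper). -/
def pvCnt (s m : Int) : List Int → Int
  | [] => 0
  | e :: r => (if s = max m e then 1 else 0) + pvCnt (s + 1) (max m e) r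

lemma pvA_fold (arr : List Int) : ∀ (s c m : Int),
    ((PySem.List.enumerate arr s).foldl
      (fun (st : Int × Int) (p : Int × Int) =>
        let me := max st.2 p.2
        (if p.1 == me then st.1 + 1 else st.1, me))
      (c, m)).1 = c + pvCnt s m arr := by
  induction arr with
  | nil => intro s c m; simp [PySem.List.enumerate_nil, pvCnt]
  | cons e r ih =>
    intro s c m
    rw [PySem.List.enumerate_cons]
    simp only [List.foldl_cons, pvCnt]
    rw [ih]
    by_cases h : s = max m e <;> simp [h] <;> ring

lemma pvB_fold : ∀ (r pre : List Int) (c : Int),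
    (PySem.List.pyRange (pre.length : Int) ((pre.length + r.length : Nat) : Int) 1).foldl
      (fun (c : Int) (i : Int) =>
        if (PySem.List.slice (pre ++ r) none (some (i + 1))).foldl max 0 == i then c + 1 else c)
      c
    = c + pvCnt (pre.length : Int) (pre.foldl max 0) r := by
  intro r
  induction r with
  | nil =>
    intro pre c
    rw [PySem.List.pyRange_one_eq_nil (by simp)]
    simp [pvCnt]
  | cons e t ih =>
    intro pre c
    rw [PySem.List.pyRange_one_cons (by push_cast [List.length_cons]; omega)]
    simp only [List.foldl_cons]
    have hsl : PySem.List.slice (pre ++ e :: t) none (some ((pre.length : Int) + 1))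
        = pre ++ [e] := by
      rw [show ((pre.length : Int) + 1) = ((pre.length + 1 : Nat) : Int) by push_cast; ring,
        PySem.List.slice_to_natCast]
      rw [List.take_append]
      simp
    have hmax : (pre ++ [e]).foldl max 0 = max (pre.foldl max 0) e := by
      rw [List.foldl_append]; simp
    have hrec := ih (pre ++ [e])
      (if (PySem.List.slice (pre ++ e :: t) none (some ((pre.length : Int) + 1))).foldl max 0
          == (pre.length : Int) then c + 1 else c)
    simp only [List.append_assoc, List.singleton_append, List.length_append,
      List.length_singleton] at hrec
    rw [show (pre.length : Int) + 1 = ((pre.length + 1 : Nat) : Int) by push_cast; ring] at *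
    rw [show (pre.length + (e :: t).length : Nat) = (pre.length + 1 + t.length : Nat) by
      simp; omega] at *
    rw [hrec, hmax, hsl, hmax]
    simp only [pvCnt]
    by_cases h : (pre.length : Int) = max (pre.foldl max 0) e
    · simp [h]; push_cast; ring
    · simp only [beq_iff_eq]
      rw [if_neg (fun hh => h hh.symm), if_neg h]
      push_cast
      ring_nf

-- ===== VERDICT (by name: the statement is the Claim_ definition above) =====
theorem maxi_no_of_partitions_spec : Claim_equal_maxi_no_of_partitions := by
  intro arr _
  unfold Spec_maxi_no_of_partitions maxi_no_of_partitions maxi_no_of_partitions_alt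
  rw [pvA_fold]
  have := pvB_fold arr [] 0
  simp only [List.length_nil, List.nil_append, Nat.cast_zero, List.foldl_nil,
    zero_add] at this ⊢
  exact this.symm
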